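-- pv_equiv track=rewrite | github.com/user42O/goa-group-11 | day48/classwork.py | score_answers
-- ===== SOURCE A (Python) =====
-- def score_answers(correct_answers, student_answers):
--     score = 0
--     for i in range(len(correct_answers)):
--         if student_answers[i] == "":
--             continue
--         elif student_answers[i] == correct_answers[i]:
--             score += 4
--         else:
--             score -= 1
--     return max(0, score)
-- ===== SOURCE B (Python) =====
-- def score_answers(correct_answers, student_answers):
--     # Divide-and-conquer: the raw (unclamped) score of index segment [lo, hi)
--     # is computed by splitting the segment at its midpoint and adding the two
--     # halves; a one-element segment is scored directly. Clamp once at the top.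
--     def raw(lo, hi):
--         if hi - lo == 1:
--             s = student_answers[lo]
--             if s == "":
--                 return 0
--             return 4 if s == correct_answers[lo] else -1
--         if hi == lo:
--             return 0
--         mid = (lo + hi) // 2
--         return raw(lo, mid) + raw(mid, hi)
--     return max(0, raw(0, len(correct_answers)))
-- ===== Notes on version B (the rewrite author's own statement) =====
-- stated objective: alternative
-- what changed: Replaces A's left-to-right accumulator loop by a divide-and-conquer recursion that splits the index range at its midpoint, scores one-element segments directly, sums the two halves, and clamps once at the top (correct because addition of per-index contributions is associative).
-- outside the precondition, e.g. on score_answers(['a', 'b'], ['a']): A raises IndexError, B raises IndexError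
import Mathlib
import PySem

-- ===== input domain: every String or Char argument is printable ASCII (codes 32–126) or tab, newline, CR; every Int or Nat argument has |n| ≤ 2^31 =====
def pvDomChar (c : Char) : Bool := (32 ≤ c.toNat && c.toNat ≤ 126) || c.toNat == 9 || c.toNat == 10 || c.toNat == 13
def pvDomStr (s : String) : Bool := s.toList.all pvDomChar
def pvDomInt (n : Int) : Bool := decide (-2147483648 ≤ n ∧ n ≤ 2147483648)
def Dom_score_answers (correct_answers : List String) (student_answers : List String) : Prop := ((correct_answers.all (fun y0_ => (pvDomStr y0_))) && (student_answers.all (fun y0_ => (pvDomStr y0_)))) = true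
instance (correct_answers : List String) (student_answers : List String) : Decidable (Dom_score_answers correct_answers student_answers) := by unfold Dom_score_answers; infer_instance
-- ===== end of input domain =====

-- B replaces A's accumulator loop by a midpoint divide-and-conquer recursion (objective: alternative, same cost).

-- ===== PORT A =====
-- A's loop over range(len(correct_answers)); 'none' = IndexError on student_answers[i] (excluded by Pre_).
def pvAGo (correct_answers student_answers : List String) : List Int → Int → Option Int
  | [], score => some score
  | i :: rest, score =>
    match PySem.List.pyGet? student_answers i, PySem.List.pyGet? correct_answers i with
    | some si, some ci =>
      if si = "" then pvAGo correct_answers student_answers rest score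
      else if si = ci then pvAGo correct_answers student_answers rest (score + 4)
      else pvAGo correct_answers student_answers rest (score - 1)
    | _, _ => none

def score_answers (correct_answers : List String) (student_answers : List String) : Int :=
  (pvAGo correct_answers student_answers (PySem.List.pyRange 0 correct_answers.length 1) 0).elim 0 (fun score => max 0 score)

-- ===== PORT B =====
-- Source B's raw(lo, hi); the Nat fuel is only a totality guard (the top call passes enough),
-- 'none' = IndexError on student_answers[lo] (excluded by Pre_).
def pvRaw (correct_answers student_answers : List String) : Nat → Int → Int → Option Int
  | 0, _, _ => none
  | fuel + 1, lo, hi =>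
    if hi - lo = 1 then
      match PySem.List.pyGet? student_answers lo with
      | none => none
      | some s =>
        if s = "" then some 0
        else
          match PySem.List.pyGet? correct_answers lo with
          | none => none
          | some c => some (if s = c then 4 else -1)
    else if hi = lo then some 0
    else
      let mid := PySem.Int.floordiv (lo + hi) 2
      match pvRaw correct_answers student_answers fuel lo mid,
            pvRaw correct_answers student_answers fuel mid hi with
      | some x, some y => some (x + y)
      | _, _ => none

def score_answers_alt (correct_answers : List String) (student_answers : List String) : Int :=
  (pvRaw correct_answers student_answers (correct_answers.length + 1) 0 correct_answers.length).elim 0 (fun r => max 0 r)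

-- ===== PRECONDITION & SPEC =====
-- A raises IndexError when student_answers is shorter than correct_answers; Pre_ excludes exactly that.
def Pre_score_answers (correct_answers : List String) (student_answers : List String) : Prop :=
  correct_answers.length ≤ student_answers.length
instance (correct_answers : List String) (student_answers : List String) : Decidable (Pre_score_answers correct_answers student_answers) := by unfold Pre_score_answers; infer_instance

def pvWitness_score_answers : List String × List String := (["a", "b", "c"], ["a", "", "x"])

def Spec_score_answers (correct_answers : List String) (student_answers : List String) (out : Int) : Prop := out = score_answers_alt correct_answers student_answers
instance (correct_answers : List String) (student_answers : List String) (out : Int) : Decidable (Spec_score_answers correct_answers student_answers out) := by unfold Spec_score_answers; infer_instance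

-- ===== CLAIM (what is proved, stated in full; the proofs are below) =====
def Claim_equal_score_answers : Prop := ∀ (correct_answers : List String) (student_answers : List String), Dom_score_answers correct_answers student_answers → Pre_score_answers correct_answers student_answers → Spec_score_answers correct_answers student_answers (score_answers correct_answers student_answers)

-- ===== LEMMAS AND PROOFS =====

-- the per-index contribution both programs add up
def pvDelta (ca sa : List String) (i : Int) : Int :=
  if PySem.List.pyGetD sa i "" = "" then 0
  else if PySem.List.pyGetD sa i "" = PySem.List.pyGetD ca i "" then 4 else -1

lemma pvAGo_eq (ca sa : List String) :
    ∀ (is : List Int) (score : Int),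
      (∀ i ∈ is, 0 ≤ i ∧ i < (ca.length : Int) ∧ i < (sa.length : Int)) →
      pvAGo ca sa is score = some (score + (is.map (pvDelta ca sa)).sum) := by
  intro is
  induction is with
  | nil => intro score _; simp [pvAGo]
  | cons i rest ih =>
    intro score h
    obtain ⟨hi0, hic, his⟩ := h i (List.mem_cons_self)
    have hrest : ∀ j ∈ rest, 0 ≤ j ∧ j < (ca.length : Int) ∧ j < (sa.length : Int) :=
      fun j hj => h j (List.mem_cons_of_mem _ hj)
    have hsa : PySem.List.pyGet? sa i = some sa[i.toNat] :=
      PySem.List.pyGet?_eq_some_getElem sa hi0 his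
    have hca : PySem.List.pyGet? ca i = some ca[i.toNat] :=
      PySem.List.pyGet?_eq_some_getElem ca hi0 hic
    have hsaD : PySem.List.pyGetD sa i "" = sa[i.toNat] :=
      PySem.List.pyGetD_eq_getElem sa "" hi0 his
    have hcaD : PySem.List.pyGetD ca i "" = ca[i.toNat] :=
      PySem.List.pyGetD_eq_getElem ca "" hi0 hic
    simp only [pvAGo, hsa, hca, List.map_cons, List.sum_cons, pvDelta, hsaD, hcaD]
    by_cases he : sa[i.toNat] = ""
    · simp [he, ih score hrest]
    · by_cases hm : sa[i.toNat] = ca[i.toNat]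
      · have hce : ¬ ca[i.toNat] = "" := fun hc => he (hm.trans hc)
        rw [if_neg he, if_pos hm, ih (score + 4) hrest]
        simp [hm, hce]; ring
      · rw [if_neg he, if_neg hm, ih (score - 1) hrest]
        simp [he, hm]; ring

lemma pvRaw_eq (ca sa : List String) :
    ∀ (fuel : Nat) (lo hi : Int), 0 ≤ lo → lo ≤ hi → hi ≤ (ca.length : Int) → hi ≤ (sa.length : Int) →
      (hi - lo).toNat < fuel →
      pvRaw ca sa fuel lo hi = some (((PySem.List.pyRange lo hi 1).map (pvDelta ca sa)).sum) := by
  intro fuel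
  induction fuel with
  | zero => intro lo hi _ _ _ _ hf; omega
  | succ fuel ih =>
    intro lo hi hlo hlh hhc hhs _
    by_cases h1 : hi - lo = 1
    · have hic : lo < (ca.length : Int) := by omega
      have his : lo < (sa.length : Int) := by omega
      have hsa : PySem.List.pyGet? sa lo = some sa[lo.toNat] :=
        PySem.List.pyGet?_eq_some_getElem sa hlo his
      have hca : PySem.List.pyGet? ca lo = some ca[lo.toNat] :=
        PySem.List.pyGet?_eq_some_getElem ca hlo hic
      have hr : hi = lo + 1 := by omega
      rw [hr, PySem.List.pyRange_one_singleton]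
      simp only [pvRaw, hsa, List.map_cons, List.map_nil, List.sum_cons,
        List.sum_nil, pvDelta, PySem.List.pyGetD_eq_getElem sa "" hlo his,
        PySem.List.pyGetD_eq_getElem ca "" hlo hic, hca]
      by_cases he : sa[lo.toNat] = "" <;> simp [he]
    · by_cases h0 : hi = lo
      · simp [pvRaw, h0, PySem.List.pyRange_one_eq_nil]
      · have h2 : lo + 2 ≤ hi := by omega
        have hmid := PySem.Int.floordiv_two_mid_bounds (lo := lo) (hi := hi) hlh
        set mid := PySem.Int.floordiv (lo + hi) 2 with hmdef
        have hed : mid = (lo + hi) / 2 := by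
          rw [hmdef, PySem.Int.floordiv_eq_ediv_of_pos (by omega)]
        have hlm : lo + 1 ≤ mid := by omega
        have hmh : mid + 1 ≤ hi := by omega
        have e1 := ih lo mid hlo (by omega) (by omega) (by omega) (by omega)
        have e2 := ih mid hi (by omega) (by omega) hhc hhs (by omega)
        simp only [pvRaw, if_neg h1, if_neg h0, ← hmdef, e1, e2]
        rw [PySem.List.pyRange_one_append lo mid hi (by omega) (by omega), List.map_append,
          List.sum_append]

-- ===== VERDICT (by name: the statement is the Claim_ definition above) =====
theorem score_answers_spec : Claim_equal_score_answers := by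
  intro ca sa _ hpre
  unfold Spec_score_answers score_answers score_answers_alt
  have hb : ∀ i ∈ PySem.List.pyRange 0 (ca.length : Int) 1,
      0 ≤ i ∧ i < (ca.length : Int) ∧ i < (sa.length : Int) := by
    intro i hi
    rw [PySem.List.mem_pyRange_one] at hi
    have : (ca.length : Int) ≤ (sa.length : Int) := by exact_mod_cast hpre
    exact ⟨hi.1, hi.2, lt_of_lt_of_le hi.2 this⟩
  rw [pvAGo_eq ca sa _ 0 hb,
    pvRaw_eq ca sa (ca.length + 1) 0 (ca.length : Int) le_rfl (by positivity) le_rfl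
      (by exact_mod_cast hpre) (by omega)]
  simp
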